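-- pv_equiv track=rewrite | github.com/grandlight/leetcode | 299.bulls-and-cows.py | getHint
-- ===== SOURCE A (Python) =====
-- from collections import defaultdict
--
-- def getHint(secret: str, guess: str) -> str:
--     lookup, a, b = defaultdict(int), 0, 0
--     for s, g in zip(secret, guess):
--         if s == g:
--             a += 1
--         else:
--             b += int(lookup[s] < 0) + int(lookup[g] > 0)
--             lookup[s] += 1
--             lookup[g] -= 1
--     return f"{a}A{b}B"
-- ===== SOURCE B (Python) =====
-- from collections import Counter
--
-- def getHint(secret: str, guess: str) -> str:
--     pairs = list(zip(secret, guess))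
--     bulls = sum(1 for s, g in pairs if s == g)
--     cnt_s = Counter(s for s, g in pairs if s != g)
--     cnt_g = Counter(g for s, g in pairs if s != g)
--     cows = sum(min(cnt_s[c], cnt_g[c]) for c in cnt_s)
--     return f"{bulls}A{cows}B"
-- ===== Notes on version B (the rewrite author's own statement) =====
-- stated objective: idiomatic
-- what changed: A's single incremental pass with a signed defaultdict balance is replaced by a two-phase plan: count bulls over zip(secret, guess), build two Counters over the mismatched characters only, and take cows as the sum of per-character minima.
import Mathlib
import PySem

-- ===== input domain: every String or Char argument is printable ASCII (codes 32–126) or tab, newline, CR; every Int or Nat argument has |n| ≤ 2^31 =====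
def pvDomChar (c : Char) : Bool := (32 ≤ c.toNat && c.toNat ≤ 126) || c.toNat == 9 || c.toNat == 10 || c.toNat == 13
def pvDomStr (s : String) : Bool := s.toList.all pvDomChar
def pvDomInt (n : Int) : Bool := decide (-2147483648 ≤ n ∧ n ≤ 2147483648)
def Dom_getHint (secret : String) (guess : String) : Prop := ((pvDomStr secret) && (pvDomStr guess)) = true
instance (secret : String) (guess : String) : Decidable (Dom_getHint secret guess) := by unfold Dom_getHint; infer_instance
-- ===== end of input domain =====

-- B replaces A's single incremental defaultdict pass by a two-phase plan: bulls counted over the zip,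
-- then two Counters over the mismatched characters and cows = sum of per-character minima (alternative, not faster).

-- ===== PORT A =====
-- loop body of A; defaultdict(int) reads are getD _ 0 and 'lookup[x] += d' is Dict.modify x 0 (· + d)
-- (the key-inserting side effect of a defaultdict read is invisible to every later getD, so it is exact here)
def getHintStep (st : PySem.Dict Char Int × Int × Int) (p : Char × Char) : PySem.Dict Char Int × Int × Int :=
  if p.1 = p.2 then (st.1, st.2.1 + 1, st.2.2)
  else
    let lk := st.1
    let b := st.2.2 + (if lk.getD p.1 0 < 0 then (1 : Int) else 0) + (if 0 < lk.getD p.2 0 then (1 : Int) else 0)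
    ((lk.modify p.1 0 (· + 1)).modify p.2 0 (· - 1), st.2.1, b)

def getHint (secret : String) (guess : String) : String :=
  let r := (secret.toList.zip guess.toList).foldl getHintStep (PySem.Dict.empty, 0, 0)
  PySem.Int.toStr r.2.1 ++ "A" ++ PySem.Int.toStr r.2.2 ++ "B"

-- ===== PORT B =====
def getHint_alt (secret : String) (guess : String) : String :=
  let pairs := secret.toList.zip guess.toList
  let bulls : Int := (pairs.countP (fun p => p.1 == p.2) : Nat)
  let mis := pairs.filter (fun p => p.1 != p.2)
  let cnt_s := PySem.Dict.counter (mis.map Prod.fst)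
  let cnt_g := PySem.Dict.counter (mis.map Prod.snd)
  let cows : Int := (cnt_s.keys.map (fun c => min (cnt_s.getD c 0) (cnt_g.getD c 0))).sum
  PySem.Int.toStr bulls ++ "A" ++ PySem.Int.toStr cows ++ "B"

-- ===== PRECONDITION & SPEC =====
def Spec_getHint (secret : String) (guess : String) (out : String) : Prop := out = getHint_alt secret guess
instance (secret : String) (guess : String) (out : String) : Decidable (Spec_getHint secret guess out) := by unfold Spec_getHint; infer_instance

-- ===== CLAIM (what is proved, stated in full; the proofs are below) =====
def Claim_equal_getHint : Prop := ∀ (secret : String) (guess : String), Dom_getHint secret guess → Spec_getHint secret guess (getHint secret guess)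

-- ===== LEMMAS AND PROOFS =====

/-- the mathematical cow count: per-character minimum of occurrence counts, over the secret's characters -/
def cowsF (S G : List Char) : Int := ∑ c ∈ S.toFinset, min ((S.count c : Int)) ((G.count c : Int))

theorem cowsF_sum_over (S G : List Char) (F : Finset Char) (h : S.toFinset ⊆ F) :
    (∑ c ∈ F, min ((S.count c : Int)) ((G.count c : Int))) = cowsF S G := by
  unfold cowsF
  refine (Finset.sum_subset h ?_).symm
  intro c _ hc
  have h0 : S.count c = 0 := by
    simpa [List.count_eq_zero] using (fun hm => hc (List.mem_toFinset.mpr hm))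
  simp [h0]

theorem cowsF_append (S G : List Char) (s g : Char) (hne : s ≠ g) :
    cowsF (S ++ [s]) (G ++ [g]) =
      cowsF S G + (if ((S.count s : Int)) - (G.count s : Int) < 0 then 1 else 0)
                + (if 0 < ((S.count g : Int)) - (G.count g : Int) then 1 else 0) := by
  classical
  set F : Finset Char := insert s (insert g S.toFinset) with hF
  have hS : S.toFinset ⊆ F := fun c hc => by simp [hF, hc]
  have hS' : (S ++ [s]).toFinset ⊆ F := by
    intro c hc
    rcases List.mem_append.mp (List.mem_toFinset.mp hc) with h | h
    · exact hS (List.mem_toFinset.mpr h)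
    · simp [hF, List.mem_singleton.mp h]
  rw [← cowsF_sum_over (S ++ [s]) (G ++ [g]) F hS', ← cowsF_sum_over S G F hS]
  have hpt : ∀ c ∈ F,
      min (((S ++ [s]).count c : Int)) (((G ++ [g]).count c : Int)) =
        min ((S.count c : Int)) ((G.count c : Int))
          + (if c = s then (if ((S.count s : Int)) - (G.count s : Int) < 0 then (1:Int) else 0) else 0)
          + (if c = g then (if 0 < ((S.count g : Int)) - (G.count g : Int) then (1:Int) else 0) else 0) := by
    intro c _
    have e1 : (S ++ [s]).count c = S.count c + (if s = c then 1 else 0) := by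
      rw [List.count_append, List.count_singleton']
    have e2 : (G ++ [g]).count c = G.count c + (if g = c then 1 else 0) := by
      rw [List.count_append, List.count_singleton']
    rw [e1, e2]
    rcases eq_or_ne c s with h1 | h1
    · subst h1
      simp only [if_neg (show ¬ g = c from fun h => hne h.symm),
        if_neg (show ¬ c = g from hne)]
      push_cast
      split_ifs <;> omega
    · simp only [if_neg (show ¬ s = c from fun h => h1 h.symm), if_neg h1]
      rcases eq_or_ne c g with h2 | h2
      · subst h2
        push_cast
        split_ifs <;> omega
      · simp only [if_neg (show ¬ g = c from fun h => h2 h.symm), if_neg h2]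
        push_cast
        omega
  rw [Finset.sum_congr rfl hpt, Finset.sum_add_distrib, Finset.sum_add_distrib]
  have hs : s ∈ F := by simp [hF]
  have hg : g ∈ F := by simp [hF]
  rw [Finset.sum_ite_eq' F s, Finset.sum_ite_eq' F g, if_pos hs, if_pos hg]

theorem loopA (ps : List (Char × Char)) :
    ∀ (S G : List Char) (lk : PySem.Dict Char Int) (a b : Int),
      (∀ c, lk.getD c 0 = ((S.count c : Int)) - (G.count c : Int)) →
      b = cowsF S G →
      (ps.foldl getHintStep (lk, a, b)).2.1 = a + ((ps.countP (fun p => p.1 == p.2) : Nat) : Int) ∧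
      (ps.foldl getHintStep (lk, a, b)).2.2 =
        cowsF (S ++ (ps.filter (fun p => p.1 != p.2)).map Prod.fst)
              (G ++ (ps.filter (fun p => p.1 != p.2)).map Prod.snd) := by
  induction ps with
  | nil => intro S G lk a b hlk hb; simpa using hb
  | cons p ps ih =>
    intro S G lk a b hlk hb
    rw [List.foldl_cons]
    by_cases hpq : p.1 = p.2
    · rw [show getHintStep (lk, a, b) p = (lk, a + 1, b) from by simp [getHintStep, hpq]]
      obtain ⟨h1, h2⟩ := ih S G lk (a + 1) b hlk hb
      refine ⟨?_, ?_⟩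
      · rw [h1, List.countP_cons]
        simp only [hpq, beq_self_eq_true, if_pos]
        push_cast; ring
      · rw [h2]
        congr 2 <;> rw [List.filter_cons_of_neg (by simp [hpq])]
    · have hstep : getHintStep (lk, a, b) p =
          ((lk.modify p.1 0 (· + 1)).modify p.2 0 (· - 1), a,
            b + (if lk.getD p.1 0 < 0 then (1 : Int) else 0) + (if 0 < lk.getD p.2 0 then (1 : Int) else 0)) := by
        simp [getHintStep, hpq]
      rw [hstep]
      have hlk' : ∀ c, ((lk.modify p.1 0 (· + 1)).modify p.2 0 (· - 1)).getD c 0 =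
          (((S ++ [p.1]).count c : Int)) - ((G ++ [p.2]).count c : Int) := by
        intro c
        simp only [PySem.Dict.getD_modify, hlk, List.count_append, List.count_singleton']
        rcases eq_or_ne c p.1 with h1 | h1 <;> rcases eq_or_ne c p.2 with h2 | h2
        · exact absurd (h1.symm.trans h2) hpq
        · simp only [h1, if_neg hpq,
            if_neg (show ¬ p.2 = p.1 from fun h => hpq h.symm)]
          push_cast; omega
        · simp only [h2,
            if_neg (show ¬ p.2 = p.1 from fun h => hpq h.symm), if_neg hpq]
          push_cast; omega
        · simp only [if_neg h1, if_neg h2,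
            if_neg (show ¬ p.1 = c from fun h => h1 h.symm),
            if_neg (show ¬ p.2 = c from fun h => h2 h.symm)]
          push_cast; omega
      have hb' : b + (if lk.getD p.1 0 < 0 then (1 : Int) else 0) + (if 0 < lk.getD p.2 0 then (1 : Int) else 0)
          = cowsF (S ++ [p.1]) (G ++ [p.2]) := by
        rw [cowsF_append S G p.1 p.2 hpq, hb, hlk p.1, hlk p.2]
      obtain ⟨h1, h2⟩ := ih (S ++ [p.1]) (G ++ [p.2])
        ((lk.modify p.1 0 (· + 1)).modify p.2 0 (· - 1)) a _ hlk' hb'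
      refine ⟨?_, ?_⟩
      · rw [h1, List.countP_cons]
        simp only [beq_iff_eq, hpq, if_false]
        push_cast; ring
      · rw [h2, List.filter_cons_of_pos (by simp [hpq])]
        simp [List.append_assoc]

theorem alt_cows (S G : List Char) :
    ((PySem.Dict.counter S).keys.map
      (fun c => min ((PySem.Dict.counter S).getD c 0) ((PySem.Dict.counter G).getD c 0))).sum
      = cowsF S G := by
  have hnd : (PySem.Set.ofList S).Nodup := PySem.Set.nodup_ofList S
  have htf : (PySem.Set.ofList S).toFinset = S.toFinset := by
    ext c; simp [List.mem_toFinset, PySem.Set.mem_ofList]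
  calc ((PySem.Dict.counter S).keys.map
      (fun c => min ((PySem.Dict.counter S).getD c 0) ((PySem.Dict.counter G).getD c 0))).sum
      = ((PySem.Set.ofList S).map (fun c => min ((S.count c : Int)) ((G.count c : Int)))).sum := by
        rw [PySem.Dict.keys_counter]
        exact congrArg List.sum (List.map_congr_left
          (fun c _ => by rw [PySem.Dict.getD_counter, PySem.Dict.getD_counter]))
    _ = cowsF S G := by
        rw [← List.sum_toFinset _ hnd, htf]; rfl

-- ===== VERDICT (by name: the statement is the Claim_ definition above) =====
theorem getHint_spec : Claim_equal_getHint := by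
  intro secret guess _
  unfold Spec_getHint getHint getHint_alt
  have h := loopA (secret.toList.zip guess.toList) [] [] PySem.Dict.empty 0 0
    (fun c => by simp [PySem.Dict.getD_empty]) (by simp [cowsF])
  simp only [List.nil_append] at h
  dsimp only
  rw [h.1, h.2, alt_cows]
  simp
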